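-- pv_equiv track=rewrite | github.com/ankurbhambri/DS-Algo | sliding-window/2ptr/shortest-substring.py | findShortestSubstring
-- ===== SOURCE A (Python) =====
-- from collections import Counter
--
-- def findShortestSubstring(s):
--
--     n = len(s)
--
--     char_count = Counter(s)
--
--     # characters appear more than once
--     duplicates = {char for char, count in char_count.items() if count > 1}
--
--     if len(duplicates) == 0:
--         return 0
--
--     l = 0
--     freq = {}
--     min_length = n
--
--     for r in range(n):
--
--         if s[r] in duplicates:
--             freq[s[r]] = freq.get(s[r], 0) + 1
--
--         # Try to contract window from left
--         while l <= r:
--             # Check if current window contains enough duplicates to remove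
--             # We need (char_count[char] - 1) occurrences of each duplicate char
--             can_contract = True
--             for char in duplicates:
--                 if freq.get(char, 0) < char_count[char] - 1:
--                     can_contract = False
--                     break
--
--             if can_contract:
--
--                 # Current window is valid, update minimum length
--                 min_length = min(min_length, r - l + 1)
--
--                 # Try to contract from left
--                 if s[l] in freq:
--                     freq[s[l]] -= 1
--                     if freq[s[l]] == 0:
--                         del freq[s[l]]
--                 l += 1
--             else:
--                 break
--
--     return min_length
-- ===== SOURCE B (Python) =====
-- from collections import Counter
--
-- def findShortestSubstring(s):
--     # One-pass sliding window: maintain a count of duplicate chars whose window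
--     # occurrences already reached need = count-1, instead of rescanning all
--     # duplicates at every contraction step.
--     need = {c: k - 1 for c, k in Counter(s).items() if k > 1}
--     k = len(need)
--     if k == 0:
--         return 0
--     best = len(s)
--     freq = {}
--     satisfied = 0
--     l = 0
--     for r in range(len(s)):
--         c = s[r]
--         if c in need:
--             f = freq.get(c, 0) + 1
--             freq[c] = f
--             if f == need[c]:
--                 satisfied += 1
--         while l <= r and satisfied == k:
--             if r - l + 1 < best:
--                 best = r - l + 1
--             c = s[l]
--             if c in need:
--                 f = freq[c] - 1
--                 freq[c] = f
--                 if f == need[c] - 1: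
--                     satisfied -= 1
--             l += 1
--     return best
-- ===== Notes on version B (the rewrite author's own statement) =====
-- stated objective: faster
-- what changed: B replaces A's inner rescan over all duplicate characters at every window contraction by an incrementally maintained counter of duplicate characters whose window count already reached its requirement, so window validity is an O(1) check.
import Mathlib
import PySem

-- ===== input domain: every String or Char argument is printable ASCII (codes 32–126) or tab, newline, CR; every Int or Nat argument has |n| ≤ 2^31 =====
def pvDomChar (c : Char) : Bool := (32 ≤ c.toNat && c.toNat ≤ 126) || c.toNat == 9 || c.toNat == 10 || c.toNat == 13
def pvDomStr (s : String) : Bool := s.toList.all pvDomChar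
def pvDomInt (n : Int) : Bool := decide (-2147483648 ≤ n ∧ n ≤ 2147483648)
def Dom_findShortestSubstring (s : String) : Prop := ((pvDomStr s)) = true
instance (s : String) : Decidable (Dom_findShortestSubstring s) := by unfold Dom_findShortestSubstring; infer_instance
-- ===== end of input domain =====

-- B replaces A's inner rescan of all duplicate characters by an incrementally
-- maintained count of already-satisfied duplicate characters (objective: faster).

-- ===== PORT A =====
-- inner `while l <= r:` loop of A; fuel = r + 1 - l bounds the iteration count
-- (l increases by 1 per iteration, the guard needs l ≤ r), so fuel never runs out.
def pvContractA (xs : List Char) (cc : PySem.Dict Char Int) (dups : PySem.Set Char) (r : Nat) :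
    Nat → Nat × PySem.Dict Char Int × Int → Nat × PySem.Dict Char Int × Int
  | 0, st => st
  | fuel+1, (l, freq, minLen) =>
    if l ≤ r then
      -- `for char in duplicates: if freq.get(char, 0) < char_count[char] - 1: break`
      -- (order-independent all-check over the set)
      let canContract := dups.all (fun c => !(freq.getD c 0 < cc.getD c 0 - 1))
      if canContract then
        let minLen := min minLen ((r : Int) - (l : Int) + 1)
        let ch := xs.getD l ' '   -- s[l], always in range since l ≤ r < len(s)
        let freq :=
          if freq.contains ch then
            let f := freq.insert ch (freq.getD ch 0 - 1)
            if f.getD ch 0 = 0 then f.erase ch else f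
          else freq
        pvContractA xs cc dups r fuel (l+1, freq, minLen)
      else (l, freq, minLen)
    else (l, freq, minLen)

def findShortestSubstring (s : String) : Int :=
  let xs := s.toList
  let n := xs.length
  let cc := PySem.Dict.counter xs
  let dups : PySem.Set Char := PySem.Set.ofList ((cc.items.filter (fun p => 1 < p.2)).map (·.1))
  if dups.length = 0 then 0
  else
    let st := (List.range n).foldl (fun st r =>
      let (l, freq, minLen) := st
      let ch := xs.getD r ' '   -- s[r], in range since r < n
      let freq := if dups.contains ch then freq.insert ch (freq.getD ch 0 + 1) else freq
      pvContractA xs cc dups r (r + 1 - l) (l, freq, minLen))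
      (0, PySem.Dict.empty, (n : Int))
    st.2.2

-- ===== PORT B =====
-- inner `while l <= r and satisfied == k:` loop of B; same fuel bound as in A's port.
def pvContractB (xs : List Char) (need : PySem.Dict Char Int) (k : Int) (r : Nat) :
    Nat → Nat × PySem.Dict Char Int × Int × Int → Nat × PySem.Dict Char Int × Int × Int
  | 0, st => st
  | fuel+1, (l, freq, sat, best) =>
    if l ≤ r ∧ sat = k then
      let best := if (r : Int) - (l : Int) + 1 < best then (r : Int) - (l : Int) + 1 else best
      let c := xs.getD l ' '   -- s[l], always in range since l ≤ r < len(s)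
      let fs :=
        if need.contains c then
          let f := freq.getD c 0 - 1   -- freq[c]; the key is present: c occurs in the window
          (freq.insert c f, if f = need.getD c 0 - 1 then sat - 1 else sat)
        else (freq, sat)
      pvContractB xs need k r fuel (l+1, fs.1, fs.2, best)
    else (l, freq, sat, best)

def findShortestSubstring_alt (s : String) : Int :=
  let xs := s.toList
  let cc := PySem.Dict.counter xs
  -- need = {c: k - 1 for c, k in Counter(s).items() if k > 1}
  let need : PySem.Dict Char Int :=
    (cc.items.filter (fun p => 1 < p.2)).foldl
      (fun d p => d.insert p.1 (p.2 - 1)) PySem.Dict.empty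
  let k : Int := need.size
  if k = 0 then 0
  else
    let st := (List.range xs.length).foldl (fun st r =>
      let (l, freq, sat, best) := st
      let c := xs.getD r ' '   -- s[r], in range since r < len(s)
      let fs :=
        if need.contains c then
          let f := freq.getD c 0 + 1
          (freq.insert c f, if f = need.getD c 0 then sat + 1 else sat)
        else (freq, sat)
      pvContractB xs need k r (r + 1 - l) (l, fs.1, fs.2, best))
      (0, PySem.Dict.empty, 0, (xs.length : Int))
    st.2.2.2

-- ===== PRECONDITION & SPEC =====
def Spec_findShortestSubstring (s : String) (out : Int) : Prop := out = findShortestSubstring_alt s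
instance (s : String) (out : Int) : Decidable (Spec_findShortestSubstring s out) := by unfold Spec_findShortestSubstring; infer_instance

-- ===== CLAIM (what is proved, stated in full; the proofs are below) =====
def Claim_equal_findShortestSubstring : Prop := ∀ (s : String), Dom_findShortestSubstring s → Spec_findShortestSubstring s (findShortestSubstring s)

-- ===== LEMMAS AND PROOFS =====

-- occurrence count of c in the current window s[l:u]
def pvW (xs : List Char) (l u : Nat) (c : Char) : Int := (((xs.take u).drop l).count c : Int)

-- the duplicate-character list A derives from the counter
def pvDups (xs : List Char) : List Char :=
  PySem.Set.ofList (((PySem.Dict.counter xs).items.filter (fun p => 1 < p.2)).map (·.1))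

-- the need dictionary B derives from the counter
def pvNeed (xs : List Char) : PySem.Dict Char Int :=
  (((PySem.Dict.counter xs).items.filter (fun p => 1 < p.2))).foldl
    (fun d p => d.insert p.1 (p.2 - 1)) PySem.Dict.empty

-- A's freq holds exactly the duplicate chars present in the window, with their window counts
def pvInvA (xs : List Char) (l u : Nat) (f : PySem.Dict Char Int) : Prop :=
  ∀ c, f.get? c = if 1 < (xs.count c : Int) ∧ 0 < pvW xs l u c then some (pvW xs l u c) else none

-- B's freq maps every duplicate char to its window count (no deletion of zeros)
def pvInvB (xs : List Char) (l u : Nat) (f : PySem.Dict Char Int) : Prop :=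
  ∀ c, f.getD c 0 = if 1 < (xs.count c : Int) then pvW xs l u c else 0

-- B's satisfied counter counts the duplicate chars whose window count reached need
def pvSat (xs : List Char) (l u : Nat) (sat : Int) : Prop :=
  sat = ((pvDups xs).countP (fun c => decide ((xs.count c : Int) - 1 ≤ pvW xs l u c)) : Int)

lemma nodup_fst (xs : List Char) :
    ((((PySem.Dict.counter xs).items.filter (fun p => 1 < p.2))).map (·.1)).Nodup := by
  have h := PySem.Dict.nodup_keys_counter xs
  have hsub : ((((PySem.Dict.counter xs).items.filter (fun p => 1 < p.2))).map (·.1)).Sublist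
      (((PySem.Dict.counter xs).items).map (·.1)) :=
    List.Sublist.map _ (List.filter_sublist)
  exact h.sublist hsub

lemma mem_pvDups (xs : List Char) (c : Char) : c ∈ pvDups xs ↔ 1 < (xs.count c : Int) := by
  unfold pvDups
  rw [PySem.Set.mem_ofList]
  simp only [List.mem_map, List.mem_filter, PySem.Dict.items_counter, decide_eq_true_eq]
  constructor
  · rintro ⟨⟨k, vv⟩, ⟨⟨k', hk', hkv⟩, hgt⟩, rfl⟩
    obtain ⟨rfl, rfl⟩ := Prod.mk.injEq .. ▸ hkv.symm
    simpa using hgt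
  · intro h
    refine ⟨(c, (xs.count c : Int)), ⟨⟨c, ?_, rfl⟩, by simpa using h⟩, rfl⟩
    rw [PySem.Set.mem_ofList]
    have : 0 < xs.count c := by exact_mod_cast (by omega : (0:Int) < (xs.count c : Int))
    exact List.count_pos_iff.mp this

lemma nodup_pvDups (xs : List Char) : (pvDups xs).Nodup := PySem.Set.nodup_ofList _

lemma pvDups_eq (xs : List Char) :
    pvDups xs = (((PySem.Dict.counter xs).items.filter (fun p => 1 < p.2))).map (·.1) :=
  PySem.Set.ofList_eq_self_of_nodup _ (nodup_fst xs)

lemma pvNeed_items (xs : List Char) :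
    (pvNeed xs).items = (((PySem.Dict.counter xs).items.filter (fun p => 1 < p.2))).map
      (fun p => (p.1, p.2 - 1)) := by
  unfold pvNeed
  have := PySem.Dict.items_foldl_insert_fresh
    (((PySem.Dict.counter xs).items.filter (fun p => 1 < p.2))) (·.1) (fun p => p.2 - 1)
    PySem.Dict.empty (by intro a _; simp [PySem.Dict.contains_empty]) (nodup_fst xs)
  simpa using this

lemma pvNeed_keys (xs : List Char) :
    (pvNeed xs).keys = (((PySem.Dict.counter xs).items.filter (fun p => 1 < p.2))).map (·.1) := by
  show (pvNeed xs).items.map (·.1) = _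
  rw [pvNeed_items, List.map_map]
  rfl

lemma pvNeed_get? (xs : List Char) (c : Char) :
    (pvNeed xs).get? c = if 1 < (xs.count c : Int) then some ((xs.count c : Int) - 1) else none := by
  have hnd : (pvNeed xs).keys.Nodup := by rw [pvNeed_keys]; exact nodup_fst xs
  split_ifs with h
  · apply PySem.Dict.get?_of_mem_items _ _ hnd
    rw [pvNeed_items]
    refine List.mem_map.mpr ⟨(c, (xs.count c : Int)), ?_, rfl⟩
    rw [List.mem_filter, PySem.Dict.items_counter]
    refine ⟨List.mem_map.mpr ⟨c, ?_, rfl⟩, by simpa using h⟩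
    rw [PySem.Set.mem_ofList]
    have : 0 < xs.count c := by exact_mod_cast (by omega : (0:Int) < (xs.count c : Int))
    exact List.count_pos_iff.mp this
  · rw [PySem.Dict.get?_eq_none_iff_not_mem_keys]
    rw [pvNeed_keys]
    rintro hc
    obtain ⟨⟨k, vv⟩, hmem, rfl⟩ := List.mem_map.mp hc
    rw [List.mem_filter, PySem.Dict.items_counter] at hmem
    obtain ⟨hm, hgt⟩ := hmem
    obtain ⟨k', _, hkv⟩ := List.mem_map.mp hm
    injection hkv with h1 h2
    subst h1; subst h2
    simp at hgt h
    omega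

lemma pvNeed_size (xs : List Char) : (pvNeed xs).size = (pvDups xs).length := by
  show (pvNeed xs).items.length = _
  rw [pvNeed_items, pvDups_eq]
  simp

lemma find?_filter_ne (items : List (Char × Int)) (k k' : Char) :
    ((items.filter (fun p => !(p.1 == k))).find? (fun p => p.1 == k')) =
      if k' = k then none else items.find? (fun p => p.1 == k') := by
  induction items with
  | nil => simp
  | cons x t ih =>
    rw [List.filter_cons]
    by_cases hxk : x.1 = k
    · rw [if_neg (by simp [hxk]), ih]
      by_cases hkk : k' = k
      · simp [hkk]
      · rw [if_neg hkk, if_neg hkk,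
          List.find?_cons_of_neg (by simp; exact fun h => hkk (h ▸ hxk ▸ rfl))]
    · rw [if_pos (by simp [hxk])]
      by_cases hxk' : x.1 = k'
      · rw [List.find?_cons_of_pos (by simp [hxk']),
          List.find?_cons_of_pos (by simp [hxk']),
          if_neg (fun h => hxk (hxk'.trans h))]
      · rw [List.find?_cons_of_neg (by simp [hxk']), ih]
        by_cases hkk : k' = k
        · simp [hkk]
        · rw [if_neg hkk, if_neg hkk, List.find?_cons_of_neg (by simp [hxk'])]

lemma dict_get?_erase (d : PySem.Dict Char Int) (k k' : Char) :
    (d.erase k).get? k' = if k' = k then none else d.get? k' := by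
  show (Option.map _ (List.find? _ (List.filter _ d.items))) = _
  rw [find?_filter_ne]
  split_ifs <;> rfl

lemma countP_change {l : List Char} (hnd : l.Nodup) (a : Char) (p q : Char → Bool)
    (hpq : ∀ x ∈ l, x ≠ a → p x = q x) :
    (l.countP q : Int) = (l.countP p : Int) +
      (if a ∈ l then ((if q a then (1:Int) else 0) - (if p a then 1 else 0)) else 0) := by
  induction l with
  | nil => simp
  | cons x t ih =>
    obtain ⟨hx, ht⟩ := List.nodup_cons.mp hnd
    by_cases hxa : x = a
    · subst hxa
      have hcong : t.countP q = t.countP p :=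
        (List.countP_congr (fun y hy => by
          rw [hpq y (List.mem_cons_of_mem _ hy) (fun h => hx (h ▸ hy))])).symm
      simp only [List.countP_cons, List.mem_cons, true_or, if_pos]
      rw [hcong]
      push_cast
      split_ifs <;> omega
    · have hpx : p x = q x := hpq x (List.mem_cons_self ..) hxa
      have ih' := ih ht (fun y hy hya => hpq y (List.mem_cons_of_mem _ hy) hya)
      simp only [List.countP_cons, List.mem_cons]
      have : (a = x ∨ a ∈ t) ↔ a ∈ t := by
        constructor
        · rintro (rfl | h)
          · exact absurd rfl (Ne.symm hxa)
          · exact h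
        · exact Or.inr
      rw [if_congr this rfl rfl]
      push_cast
      push_cast at ih'
      rw [hpx]
      split_ifs at ih' ⊢ <;> omega

lemma pvW_nonneg (xs : List Char) (l u : Nat) (c : Char) : 0 ≤ pvW xs l u c := by
  simp [pvW]

lemma pvW_shrink (xs : List Char) {l u : Nat} (h : l < u) (hu : u ≤ xs.length) (c : Char) :
    pvW xs l u c = (if c = xs.getD l ' ' then 1 else 0) + pvW xs (l+1) u c := by
  unfold pvW
  have hlen : (xs.take u).length = u := by simp [Nat.min_eq_left hu]
  have hlt : l < (xs.take u).length := by omega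
  rw [List.drop_eq_getElem_cons hlt]
  have hg : (xs.take u)[l] = xs[l]'(by omega) := List.getElem_take
  have hgd : xs.getD l ' ' = xs[l]'(by omega) := List.getD_eq_getElem xs ' ' (by omega)
  rw [List.count_cons, hg, hgd]
  push_cast
  split_ifs with h1 h2 <;> simp_all <;> omega

lemma pvW_grow (xs : List Char) {l r : Nat} (hl : l ≤ r) (hr : r < xs.length) (c : Char) :
    pvW xs l (r+1) c = pvW xs l r c + (if c = xs.getD r ' ' then 1 else 0) := by
  unfold pvW
  have ht : xs.take (r+1) = xs.take r ++ [xs[r]'hr] := by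
    rw [List.take_succ]
    simp [List.getElem?_eq_getElem hr]
  have hlen : (xs.take r).length = r := by simp [Nat.min_eq_left (le_of_lt hr)]
  rw [ht, List.drop_append_of_le_length (by omega), List.count_append]
  have hgd : xs.getD r ' ' = xs[r]'hr := List.getD_eq_getElem xs ' ' hr
  rw [hgd]
  push_cast
  split_ifs with h1 <;> simp [h1, List.count_singleton] <;> simp [Ne.symm, h1]

lemma invA_getD (xs : List Char) {l u : Nat} {f : PySem.Dict Char Int}
    (hA : pvInvA xs l u f) (c : Char) (hc : 1 < (xs.count c : Int)) :
    f.getD c 0 = pvW xs l u c := by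
  rw [PySem.Dict.getD_eq_get?_getD, hA c]
  by_cases h : 0 < pvW xs l u c
  · simp [hc, h]
  · have := pvW_nonneg xs l u c
    simp [hc, h]
    omega

-- A's rescan succeeds exactly when B's satisfied counter equals the number of duplicates
lemma can_iff (xs : List Char) {l u : Nat} {f : PySem.Dict Char Int} {sat : Int}
    (hA : pvInvA xs l u f) (hS : pvSat xs l u sat) :
    ((pvDups xs).all (fun c => !(f.getD c 0 < (PySem.Dict.counter xs).getD c 0 - 1)) = true)
      ↔ sat = ((pvDups xs).length : Int) := by
  rw [List.all_eq_true, hS]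
  have hiff : ∀ c ∈ pvDups xs,
      ((fun c => !(f.getD c 0 < (PySem.Dict.counter xs).getD c 0 - 1)) c = true)
        ↔ ((fun c => decide ((xs.count c : Int) - 1 ≤ pvW xs l u c)) c = true) := by
    intro c hc
    have hcnt := (mem_pvDups xs c).mp hc
    simp only [PySem.Dict.getD_counter, invA_getD xs hA c hcnt, Bool.not_eq_eq_eq_not,
      Bool.not_true, decide_eq_true_eq, decide_eq_false_iff_not, not_lt]
  rw [Nat.cast_inj, List.countP_eq_length]
  exact ⟨fun h c hc => (hiff c hc).mp (h c hc), fun h c hc => (hiff c hc).mpr (h c hc)⟩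

lemma set_contains_iff (s : PySem.Set Char) (c : Char) : s.contains c = true ↔ c ∈ s := by
  simp [PySem.Set.contains]

lemma contract_sim (xs : List Char) (r : Nat) (hr : r < xs.length) :
    ∀ fuel l fA fB sat m, l ≤ r + 1 →
    pvInvA xs l (r+1) fA → pvInvB xs l (r+1) fB → pvSat xs l (r+1) sat →
    ∃ l' fA' fB' sat' m',
      pvContractA xs (PySem.Dict.counter xs) (pvDups xs) r fuel (l, fA, m) = (l', fA', m') ∧
      pvContractB xs (pvNeed xs) ((pvDups xs).length : Int) r fuel (l, fB, sat, m) = (l', fB', sat', m') ∧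
      l' ≤ r + 1 ∧ pvInvA xs l' (r+1) fA' ∧ pvInvB xs l' (r+1) fB' ∧ pvSat xs l' (r+1) sat' := by
  intro fuel
  induction fuel with
  | zero =>
    intro l fA fB sat m hl hA hB hS
    exact ⟨l, fA, fB, sat, m, rfl, rfl, hl, hA, hB, hS⟩
  | succ fuel ih =>
    intro l fA fB sat m hl hA hB hS
    by_cases hguard : l ≤ r
    · by_cases hsat : sat = ((pvDups xs).length : Int)
      · have hcan : ((pvDups xs).all
            (fun c => !(fA.getD c 0 < (PySem.Dict.counter xs).getD c 0 - 1))) = true :=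
          (can_iff xs hA hS).mpr hsat
        have hlu : l < r + 1 := by omega
        have hw := fun c => pvW_shrink xs hlu (by omega) c
        have hwch : pvW xs l (r+1) (xs.getD l ' ') = 1 + pvW xs (l+1) (r+1) (xs.getD l ' ') := by
          rw [hw (xs.getD l ' ')]; simp
        have hbest : (if (r:Int) - (l:Int) + 1 < m then (r:Int) - (l:Int) + 1 else m)
            = min m ((r:Int) - (l:Int) + 1) := by
          rw [min_def]; split_ifs <;> omega
        by_cases hch : 1 < (xs.count (xs.getD l ' ') : Int)
        · -- a duplicate character leaves the window
          have hgetD : fA.getD (xs.getD l ' ') 0 = pvW xs l (r+1) (xs.getD l ' ') :=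
            invA_getD xs hA _ hch
          have hwpos : 0 < pvW xs l (r+1) (xs.getD l ' ') := by
            have := pvW_nonneg xs (l+1) (r+1) (xs.getD l ' '); omega
          have hcontA : fA.contains (xs.getD l ' ') = true := by
            rw [PySem.Dict.contains_eq_isSome_get?, hA _, if_pos ⟨hch, hwpos⟩]; rfl
          have hcontB : (pvNeed xs).contains (xs.getD l ' ') = true := by
            rw [PySem.Dict.contains_eq_isSome_get?, pvNeed_get?, if_pos hch]; rfl
          have hgetDB : fB.getD (xs.getD l ' ') 0 = pvW xs l (r+1) (xs.getD l ' ') := by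
            rw [hB _, if_pos hch]
          have hneedD : (pvNeed xs).getD (xs.getD l ' ') 0 = (xs.count (xs.getD l ' ') : Int) - 1 := by
            rw [PySem.Dict.getD_eq_get?_getD, pvNeed_get?, if_pos hch]; rfl
          have hA2 : pvInvA xs (l+1) (r+1)
              (if (fA.insert (xs.getD l ' ') (fA.getD (xs.getD l ' ') 0 - 1)).getD (xs.getD l ' ') 0 = 0
               then (fA.insert (xs.getD l ' ') (fA.getD (xs.getD l ' ') 0 - 1)).erase (xs.getD l ' ')
               else fA.insert (xs.getD l ' ') (fA.getD (xs.getD l ' ') 0 - 1)) := by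
            intro c
            rw [PySem.Dict.getD_insert_self, hgetD]
            by_cases hc : c = xs.getD l ' '
            · rw [hc]
              by_cases h0 : pvW xs l (r+1) (xs.getD l ' ') - 1 = 0
              · rw [if_pos h0, dict_get?_erase, if_pos rfl, if_neg]
                intro h
                omega
              · rw [if_neg h0, PySem.Dict.get?_insert, if_pos rfl, if_pos]
                · congr 1; omega
                · have := pvW_nonneg xs (l+1) (r+1) (xs.getD l ' ')
                  exact ⟨hch, by omega⟩
            · have hWc : pvW xs (l+1) (r+1) c = pvW xs l (r+1) c := by
                rw [hw c, if_neg hc]; ring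
              by_cases h0 : pvW xs l (r+1) (xs.getD l ' ') - 1 = 0
              · rw [if_pos h0, dict_get?_erase, if_neg hc, PySem.Dict.get?_insert, if_neg hc, hA c, hWc]
              · rw [if_neg h0, PySem.Dict.get?_insert, if_neg hc, hA c, hWc]
          have hB2 : pvInvB xs (l+1) (r+1)
              (fB.insert (xs.getD l ' ') (fB.getD (xs.getD l ' ') 0 - 1)) := by
            intro c
            rw [PySem.Dict.getD_insert]
            by_cases hc : c = xs.getD l ' '
            · rw [if_pos hc, hc, if_pos hch, hgetDB]
              omega
            · rw [if_neg hc, hB c]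
              have hWc : pvW xs (l+1) (r+1) c = pvW xs l (r+1) c := by
                rw [hw c, if_neg hc]; ring
              rw [hWc]
          have hS2 : pvSat xs (l+1) (r+1)
              (if fB.getD (xs.getD l ' ') 0 - 1 = (pvNeed xs).getD (xs.getD l ' ') 0 - 1
               then sat - 1 else sat) := by
            have hpq : ∀ x ∈ pvDups xs, x ≠ xs.getD l ' ' →
                (fun c => decide ((xs.count c : Int) - 1 ≤ pvW xs l (r+1) c)) x
                  = (fun c => decide ((xs.count c : Int) - 1 ≤ pvW xs (l+1) (r+1) c)) x := by
              intro x _ hxa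
              have hWx : pvW xs (l+1) (r+1) x = pvW xs l (r+1) x := by
                rw [hw x, if_neg hxa]; ring
              simp only [hWx]
            have hcc := countP_change (nodup_pvDups xs) (xs.getD l ' ')
              (fun c => decide ((xs.count c : Int) - 1 ≤ pvW xs l (r+1) c))
              (fun c => decide ((xs.count c : Int) - 1 ≤ pvW xs (l+1) (r+1) c)) hpq
            unfold pvSat
            rw [hcc, if_pos ((mem_pvDups xs _).mpr hch), ← hS, hgetDB, hneedD, hwch]
            simp only [decide_eq_true_eq]
            split_ifs <;> omega
          have hrec := ih (l+1) _ _ _ (min m ((r:Int) - (l:Int) + 1)) (by omega) hA2 hB2 hS2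
          obtain ⟨l', fA', fB', sat', m', h1, h2, h3, h4, h5, h6⟩ := hrec
          refine ⟨l', fA', fB', sat', m', ?_, ?_, h3, h4, h5, h6⟩
          · rw [← h1]
            simp only [pvContractA, if_pos hguard, hcan, if_true, hcontA]
            try rfl
          · rw [← h2]
            simp only [pvContractB, hguard, hsat, and_self, if_true, hcontB, hbest]
            try rfl
        · -- a non-duplicate character leaves the window
          have hcontA : fA.contains (xs.getD l ' ') = false := by
            rw [PySem.Dict.contains_eq_isSome_get?, hA _, if_neg (by intro h; exact hch h.1)]; rfl
          have hcontB : (pvNeed xs).contains (xs.getD l ' ') = false := by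
            rw [PySem.Dict.contains_eq_isSome_get?, pvNeed_get?, if_neg hch]; rfl
          have hA2 : pvInvA xs (l+1) (r+1) fA := by
            intro c
            by_cases hc : c = xs.getD l ' '
            · rw [hc, hA _, if_neg (by intro h; exact hch h.1),
                if_neg (by intro h; exact hch h.1)]
            · have hWc : pvW xs (l+1) (r+1) c = pvW xs l (r+1) c := by
                rw [hw c, if_neg hc]; ring
              rw [hA c, hWc]
          have hB2 : pvInvB xs (l+1) (r+1) fB := by
            intro c
            by_cases hc : c = xs.getD l ' '
            · rw [hc, hB _, if_neg hch, if_neg hch]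
            · have hWc : pvW xs (l+1) (r+1) c = pvW xs l (r+1) c := by
                rw [hw c, if_neg hc]; ring
              rw [hB c, hWc]
          have hS2 : pvSat xs (l+1) (r+1) sat := by
            unfold pvSat
            rw [hS]
            congr 1
            refine List.countP_congr ?_
            intro x hx
            have hxc := (mem_pvDups xs x).mp hx
            have hxa : x ≠ xs.getD l ' ' := by intro h; rw [h] at hxc; exact hch hxc
            have hWx : pvW xs (l+1) (r+1) x = pvW xs l (r+1) x := by
              rw [hw x, if_neg hxa]; ring
            simp only [hWx]
          have hrec := ih (l+1) _ _ _ (min m ((r:Int) - (l:Int) + 1)) (by omega) hA2 hB2 hS2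
          obtain ⟨l', fA', fB', sat', m', h1, h2, h3, h4, h5, h6⟩ := hrec
          refine ⟨l', fA', fB', sat', m', ?_, ?_, h3, h4, h5, h6⟩
          · rw [← h1]
            simp only [pvContractA, if_pos hguard, hcan, if_true, hcontA]
            try rfl
          · rw [← h2]
            simp only [pvContractB, hguard, hsat, and_self, if_true, hcontB, hbest]
            try rfl
      · have hcan : ((pvDups xs).all
            (fun c => !(fA.getD c 0 < (PySem.Dict.counter xs).getD c 0 - 1))) = false := by
          rcases Bool.eq_false_or_eq_true ((pvDups xs).all
            (fun c => !(fA.getD c 0 < (PySem.Dict.counter xs).getD c 0 - 1))) with h | h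
          · exact absurd ((can_iff xs hA hS).mp h) hsat
          · exact h
        refine ⟨l, fA, fB, sat, m, ?_, ?_, hl, hA, hB, hS⟩
        · simp only [pvContractA, if_pos hguard, hcan]
          rfl
        · simp only [pvContractB]
          rw [if_neg (by intro h; exact hsat h.2)]
    · refine ⟨l, fA, fB, sat, m, ?_, ?_, hl, hA, hB, hS⟩
      · simp [pvContractA, hguard]
      · simp [pvContractB, hguard]


lemma outer_sim (xs : List Char) : ∀ r, r ≤ xs.length →
    ∃ l fA fB sat m,
      (List.range r).foldl (fun st r =>
        let (l, freq, minLen) := st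
        let ch := xs.getD r ' '
        let freq := if (pvDups xs).contains ch then freq.insert ch (freq.getD ch 0 + 1) else freq
        pvContractA xs (PySem.Dict.counter xs) (pvDups xs) r (r + 1 - l) (l, freq, minLen))
        (0, PySem.Dict.empty, (xs.length : Int)) = (l, fA, m) ∧
      (List.range r).foldl (fun st r =>
        let (l, freq, sat, best) := st
        let c := xs.getD r ' '
        let fs :=
          if (pvNeed xs).contains c then
            let f := freq.getD c 0 + 1
            ((freq.insert c f), if f = (pvNeed xs).getD c 0 then sat + 1 else sat)
          else (freq, sat)
        pvContractB xs (pvNeed xs) ((pvDups xs).length : Int) r (r + 1 - l) (l, fs.1, fs.2, best))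
        (0, PySem.Dict.empty, 0, (xs.length : Int)) = (l, fB, sat, m) ∧
      l ≤ r ∧ pvInvA xs l r fA ∧ pvInvB xs l r fB ∧ pvSat xs l r sat := by
  intro r
  induction r with
  | zero =>
    intro _
    refine ⟨0, PySem.Dict.empty, PySem.Dict.empty, 0, (xs.length : Int), rfl, rfl, le_rfl, ?_, ?_, ?_⟩
    · intro c
      simp [PySem.Dict.get?_empty, pvW]
    · intro c
      simp [PySem.Dict.getD_empty, pvW]
    · unfold pvSat
      rw [List.countP_eq_zero.mpr]
      · rfl
      · intro c hc
        have := (mem_pvDups xs c).mp hc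
        simp only [pvW, List.take_zero, List.drop_nil, List.count_nil, Nat.cast_zero,
          decide_eq_true_eq, not_le]
        omega
  | succ r ihr =>
    intro hr1
    have hr : r < xs.length := by omega
    obtain ⟨l, fA, fB, sat, m, h1, h2, hl, hA, hB, hS⟩ := ihr (by omega)
    rw [List.range_succ]
    have hg := fun c => pvW_grow xs hl hr c
    have hgch : pvW xs l (r+1) (xs.getD r ' ') = pvW xs l r (xs.getD r ' ') + 1 := by
      rw [hg (xs.getD r ' ')]; simp
    -- state after the freq-add step
    by_cases hch : 1 < (xs.count (xs.getD r ' ') : Int)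
    · have hcontA : (pvDups xs).contains (xs.getD r ' ') = true :=
        (set_contains_iff _ _).mpr ((mem_pvDups xs _).mpr hch)
      have hcontB : (pvNeed xs).contains (xs.getD r ' ') = true := by
        rw [PySem.Dict.contains_eq_isSome_get?, pvNeed_get?, if_pos hch]; rfl
      have hneedD : (pvNeed xs).getD (xs.getD r ' ') 0 = (xs.count (xs.getD r ' ') : Int) - 1 := by
        rw [PySem.Dict.getD_eq_get?_getD, pvNeed_get?, if_pos hch]; rfl
      have hgetDB : fB.getD (xs.getD r ' ') 0 = pvW xs l r (xs.getD r ' ') := by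
        rw [hB _, if_pos hch]
      have hA2 : pvInvA xs l (r+1) (fA.insert (xs.getD r ' ') (fA.getD (xs.getD r ' ') 0 + 1)) := by
        intro c
        rw [PySem.Dict.get?_insert]
        by_cases hc : c = xs.getD r ' '
        · rw [if_pos hc, hc, invA_getD xs hA _ hch, hgch, if_pos]
          have := pvW_nonneg xs l r (xs.getD r ' ')
          exact ⟨hch, by omega⟩
        · rw [if_neg hc, hA c, hg c, if_neg hc]
          ring_nf
      have hB2 : pvInvB xs l (r+1) (fB.insert (xs.getD r ' ') (fB.getD (xs.getD r ' ') 0 + 1)) := by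
        intro c
        rw [PySem.Dict.getD_insert]
        by_cases hc : c = xs.getD r ' '
        · rw [if_pos hc, hc, hgetDB, if_pos hch, hgch]
        · rw [if_neg hc, hB c, hg c, if_neg hc]
          ring_nf
      have hS2 : pvSat xs l (r+1)
          (if fB.getD (xs.getD r ' ') 0 + 1 = (pvNeed xs).getD (xs.getD r ' ') 0 then sat + 1 else sat) := by
        have hpq : ∀ x ∈ pvDups xs, x ≠ xs.getD r ' ' →
            (fun c => decide ((xs.count c : Int) - 1 ≤ pvW xs l r c)) x
              = (fun c => decide ((xs.count c : Int) - 1 ≤ pvW xs l (r+1) c)) x := by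
          intro x _ hxa
          have hWx : pvW xs l (r+1) x = pvW xs l r x := by
            rw [hg x, if_neg hxa]; ring
          simp only [hWx]
        have hcc := countP_change (nodup_pvDups xs) (xs.getD r ' ')
          (fun c => decide ((xs.count c : Int) - 1 ≤ pvW xs l r c))
          (fun c => decide ((xs.count c : Int) - 1 ≤ pvW xs l (r+1) c)) hpq
        unfold pvSat
        rw [hcc, if_pos ((mem_pvDups xs _).mpr hch), ← hS, hgetDB, hneedD]
        simp only [decide_eq_true_eq, hgch]
        split_ifs <;> omega
      obtain ⟨l', fA', fB', sat', m', k1, k2, k3, k4, k5, k6⟩ :=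
        contract_sim xs r hr (r + 1 - l) l _ _ _ m (by omega) hA2 hB2 hS2
      refine ⟨l', fA', fB', sat', m', ?_, ?_, by omega, k4, k5, k6⟩
      · rw [List.foldl_append, h1]
        simp only [List.foldl_cons, List.foldl_nil, hcontA, if_true]
        exact k1
      · rw [List.foldl_append, h2]
        simp only [List.foldl_cons, List.foldl_nil, hcontB, if_true]
        exact k2
    · have hcontA : (pvDups xs).contains (xs.getD r ' ') = false := by
        rw [Bool.eq_false_iff]
        intro h
        exact hch ((mem_pvDups xs _).mp ((set_contains_iff _ _).mp h))
      have hcontB : (pvNeed xs).contains (xs.getD r ' ') = false := by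
        rw [PySem.Dict.contains_eq_isSome_get?, pvNeed_get?, if_neg hch]; rfl
      have hA2 : pvInvA xs l (r+1) fA := by
        intro c
        by_cases hc : c = xs.getD r ' '
        · rw [hc, hA _, if_neg (by intro h; exact hch h.1), if_neg (by intro h; exact hch h.1)]
        · rw [hA c, hg c, if_neg hc]
          ring_nf
      have hB2 : pvInvB xs l (r+1) fB := by
        intro c
        by_cases hc : c = xs.getD r ' '
        · rw [hc, hB _, if_neg hch, if_neg hch]
        · rw [hB c, hg c, if_neg hc]
          ring_nf
      have hS2 : pvSat xs l (r+1) sat := by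
        unfold pvSat
        rw [hS]
        congr 1
        refine List.countP_congr ?_
        intro x hx
        have hxc := (mem_pvDups xs x).mp hx
        have hxa : x ≠ xs.getD r ' ' := by intro h; rw [h] at hxc; exact hch hxc
        have hWx : pvW xs l (r+1) x = pvW xs l r x := by
          rw [hg x, if_neg hxa]; ring
        simp only [hWx]
      obtain ⟨l', fA', fB', sat', m', k1, k2, k3, k4, k5, k6⟩ :=
        contract_sim xs r hr (r + 1 - l) l _ _ _ m (by omega) hA2 hB2 hS2
      refine ⟨l', fA', fB', sat', m', ?_, ?_, by omega, k4, k5, k6⟩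
      · rw [List.foldl_append, h1]
        simp only [List.foldl_cons, List.foldl_nil, hcontA, if_false]
        exact k1
      · rw [List.foldl_append, h2]
        simp only [List.foldl_cons, List.foldl_nil, hcontB, if_false]
        exact k2

theorem ports_agree (s : String) : findShortestSubstring s = findShortestSubstring_alt s := by
  simp only [findShortestSubstring, findShortestSubstring_alt]
  rw [← pvDups, ← pvNeed]
  rw [pvNeed_size]
  simp only [Nat.cast_eq_zero]
  by_cases h : (pvDups s.toList).length = 0
  · rw [if_pos h, if_pos h]
  · rw [if_neg h, if_neg h]
    obtain ⟨l, fA, fB, sat, m, h1, h2, _, _, _, _⟩ := outer_sim s.toList s.toList.length le_rfl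
    exact (congrArg (fun t => t.2.2) h1).trans ((congrArg (fun t => t.2.2.2) h2).symm)

-- ===== VERDICT (by name: the statement is the Claim_ definition above) =====
theorem findShortestSubstring_spec : Claim_equal_findShortestSubstring := by
  intro s _
  unfold Spec_findShortestSubstring
  exact ports_agree s
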